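-- pv_equiv track=rewrite | github.com/przchojecki/hadamard668 | marginals.py | gale_ryser_check
-- ===== SOURCE A (Python) =====
-- def gale_ryser_check(row_sums, col_sums):
--     """
--     Check the Gale-Ryser condition for existence of a 0-1 matrix with given
--     row and column sums. We convert from ±1 to 0-1 first.
--
--     For a ±1 matrix M of size m×n with row sums r_i and column sums c_j:
--     Let N = (M + J) / 2 where J is all-ones. Then N is 0-1 with
--     row sums (r_i + n) / 2 and column sums (c_j + m) / 2.
--     """
--     m, n = len(row_sums), len(col_sums)
--
--     # Convert to 0-1 marginals
--     r01 = [(r + n) // 2 for r in row_sums]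
--     c01 = [(c + m) // 2 for c in col_sums]
--
--     # Check: all values must be non-negative integers in valid range
--     for r in r01:
--         if r < 0 or r > n:
--             return False
--     for c in c01:
--         if c < 0 or c > m:
--             return False
--
--     # Check sum
--     if sum(r01) != sum(c01):
--         return False
--
--     # Gale-Ryser: sort row sums in decreasing order
--     r_sorted = sorted(r01, reverse=True)
--     c_sorted = sorted(c01, reverse=True)
--
--     # Check: for each k = 1, ..., m:
--     # sum_{i=1}^{k} r_sorted[i-1] <= sum_{j=1}^{n} min(c_sorted[j-1], k)
--     for k in range(1, m + 1):
--         lhs = sum(r_sorted[:k])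
--         rhs = sum(min(c, k) for c in c_sorted)
--         if lhs > rhs:
--             return False
--
--     return True
-- ===== SOURCE B (Python) =====
-- def gale_ryser_check(row_sums, col_sums):
--     """Gale-Ryser check via a running prefix sum for the lhs and a
--     two-pointer sweep over the ascending column sums for sum(min(c, k))."""
--     m, n = len(row_sums), len(col_sums)
--
--     r01 = [(r + n) // 2 for r in row_sums]
--     c01 = [(c + m) // 2 for c in col_sums]
--
--     if any(r < 0 or r > n for r in r01) or any(c < 0 or c > m for c in c01):
--         return False
--     if sum(r01) != sum(c01):
--         return False
--
--     rs = sorted(r01, reverse=True)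
--     cs = sorted(c01)  # ascending
--
--     lhs = 0      # running sum of the k largest row sums
--     small = 0    # sum of column sums already known to be < k
--     j = 0        # number of such column sums (prefix of cs)
--     k = 0
--     for r in rs:
--         k += 1
--         lhs += r
--         while j < n and cs[j] < k:
--             small += cs[j]
--             j += 1
--         if lhs > small + k * (n - j):
--             return False
--     return True
-- ===== Notes on version B (the rewrite author's own statement) =====
-- stated objective: alternative
-- what changed: Replaces the per-k recomputation of sum(r_sorted[:k]) and sum(min(c,k) for c in c_sorted) by a running prefix sum for the lhs and a single two-pointer sweep over the ascending column sums (small + k*(n-j)) for the rhs.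
import Mathlib
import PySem

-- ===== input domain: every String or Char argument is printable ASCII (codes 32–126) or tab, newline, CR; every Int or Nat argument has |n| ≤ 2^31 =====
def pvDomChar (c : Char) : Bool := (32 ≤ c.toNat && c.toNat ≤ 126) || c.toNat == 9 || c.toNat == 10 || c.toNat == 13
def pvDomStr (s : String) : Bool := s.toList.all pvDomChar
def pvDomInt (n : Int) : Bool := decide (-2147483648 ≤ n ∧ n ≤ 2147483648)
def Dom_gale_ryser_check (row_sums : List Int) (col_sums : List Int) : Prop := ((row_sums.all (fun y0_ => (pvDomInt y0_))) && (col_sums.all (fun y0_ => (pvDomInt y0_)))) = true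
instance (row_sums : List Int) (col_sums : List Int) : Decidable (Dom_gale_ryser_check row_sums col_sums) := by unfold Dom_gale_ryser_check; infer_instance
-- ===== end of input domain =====

-- B replaces A's per-k recomputation of both sides of the Gale-Ryser inequality by a running
-- prefix sum (lhs) and a two-pointer sweep over the ascending column sums (rhs); same value.

-- ===== PORT A =====
-- the final 'for k in range(1, m+1)' loop with early return
def pvALoop : List Int → List Int → List Int → Bool
  | [], _, _ => true
  | k :: ks, rs, cs =>
    if (PySem.List.slice rs none (some k)).sum > (cs.map (fun c => min c k)).sum then false
    else pvALoop ks rs cs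

def gale_ryser_check (row_sums : List Int) (col_sums : List Int) : Bool :=
  let m : Int := row_sums.length
  let n : Int := col_sums.length
  let r01 := row_sums.map (fun r => PySem.Int.floordiv (r + n) 2)
  let c01 := col_sums.map (fun c => PySem.Int.floordiv (c + m) 2)
  -- the two early-return range-check loops
  if r01.any (fun r => decide (r < 0 ∨ n < r)) then false
  else if c01.any (fun c => decide (c < 0 ∨ m < c)) then false
  else if r01.sum ≠ c01.sum then false
  else
    pvALoop (PySem.List.pyRange 1 (m + 1) 1)
      (PySem.List.sorted r01 (fun x => x) true)
      (PySem.List.sorted c01 (fun x => x) true)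

-- ===== PORT B =====
-- the inner 'while j < n and cs[j] < k' pointer advance (the suffix cs[j:] is the state)
def pvConsume : List Int → Int → Int → (List Int × Int)
  | [], _, small => ([], small)
  | c :: rest, k, small => if c < k then pvConsume rest k (small + c) else (c :: rest, small)

-- the 'for r in rs' loop with running k, lhs, small and the remaining column suffix
def pvBLoop : List Int → List Int → Int → Int → Int → Bool
  | [], _, _, _, _ => true
  | r :: rs, cs, k, lhs, small =>
    let k' := k + 1
    let lhs' := lhs + r
    let p := pvConsume cs k' small
    if lhs' > p.2 + k' * (p.1.length : Int) then false
    else pvBLoop rs p.1 k' lhs' p.2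

def gale_ryser_check_alt (row_sums : List Int) (col_sums : List Int) : Bool :=
  let m : Int := row_sums.length
  let n : Int := col_sums.length
  let r01 := row_sums.map (fun r => PySem.Int.floordiv (r + n) 2)
  let c01 := col_sums.map (fun c => PySem.Int.floordiv (c + m) 2)
  if r01.any (fun r => decide (r < 0 ∨ n < r)) || c01.any (fun c => decide (c < 0 ∨ m < c)) then false
  else if r01.sum ≠ c01.sum then false
  else
    pvBLoop (PySem.List.sorted r01 (fun x => x) true)
      (PySem.List.sorted c01 (fun x => x) false) 0 0 0

-- ===== PRECONDITION & SPEC =====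
def Spec_gale_ryser_check (row_sums : List Int) (col_sums : List Int) (out : Bool) : Prop := out = gale_ryser_check_alt row_sums col_sums
instance (row_sums : List Int) (col_sums : List Int) (out : Bool) : Decidable (Spec_gale_ryser_check row_sums col_sums out) := by unfold Spec_gale_ryser_check; infer_instance

-- ===== CLAIM (what is proved, stated in full; the proofs are below) =====
def Claim_equal_gale_ryser_check : Prop := ∀ (row_sums : List Int) (col_sums : List Int), Dom_gale_ryser_check row_sums col_sums → Spec_gale_ryser_check row_sums col_sums (gale_ryser_check row_sums col_sums)

-- ===== LEMMAS AND PROOFS =====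

-- On a ≤-sorted list, the pointer sweep removes exactly the elements < k and sums them.
theorem pvConsume_sorted (cs : List Int) (k small : Int) (h : cs.Pairwise (fun a b => a ≤ b)) :
    pvConsume cs k small
      = (cs.filter (fun c => decide (k ≤ c)), small + (cs.filter (fun c => decide (c < k))).sum) := by
  induction cs generalizing small with
  | nil => simp [pvConsume]
  | cons c rest ih =>
    rcases List.pairwise_cons.mp h with ⟨hc, hrest⟩
    by_cases hck : c < k
    · simp [pvConsume, hck, ih _ hrest, not_le.mpr hck]
      ring
    · have hkc : k ≤ c := not_lt.mp hck
      have h1 : rest.filter (fun c => decide (k ≤ c)) = rest := by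
        apply List.filter_eq_self.mpr
        intro x hx; simpa using le_trans hkc (hc x hx)
      have h2 : rest.filter (fun c => decide (c < k)) = [] := by
        apply List.filter_eq_nil_iff.mpr
        intro x hx; simpa using le_trans hkc (hc x hx)
      simp [pvConsume, hck, hkc, h1, h2]

-- sum(min(c,k) for c in C) computed from the split at k (no sortedness needed).
theorem pvRhs_eq (C : List Int) (k : Int) :
    (C.filter (fun c => decide (c < k))).sum + k * ((C.filter (fun c => decide (k ≤ c))).length : Int)
      = (C.map (fun c => min c k)).sum := by
  induction C with
  | nil => simp
  | cons c rest ih =>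
    by_cases h : c < k
    · have hmin : min c k = c := min_eq_left h.le
      simp only [List.filter_cons, List.map_cons, List.sum_cons]
      simp [h, not_le.mpr h, hmin]
      linarith [ih]
    · have hkc : k ≤ c := not_lt.mp h
      have hmin : min c k = k := min_eq_right hkc
      simp only [List.filter_cons, List.map_cons, List.sum_cons]
      simp [h, hkc]
      linarith [ih]

-- splitting the sum of filter (< i+1) at i
theorem pvSum_split (C : List Int) (i : Int) :
    (C.filter (fun c => decide (c < i + 1))).sum
      = (C.filter (fun c => decide (c < i))).sum
        + ((C.filter (fun c => decide (i ≤ c))).filter (fun c => decide (c < i + 1))).sum := by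
  induction C with
  | nil => simp
  | cons c rest ih =>
    simp only [List.filter_cons, decide_eq_true_eq]
    by_cases h1 : c < i
    · rw [if_pos (show c < i + 1 by omega), if_pos h1, if_neg (show ¬ i ≤ c by omega)]
      simp only [List.sum_cons]
      linarith [ih]
    · by_cases h2 : c < i + 1
      · rw [if_pos h2, if_neg h1, if_pos (show i ≤ c by omega)]
        simp only [List.filter_cons, decide_eq_true_eq]
        rw [if_pos h2]
        simp only [List.sum_cons]
        linarith [ih]
      · rw [if_neg h2, if_neg h1, if_pos (show i ≤ c by omega)]
        simp only [List.filter_cons, decide_eq_true_eq]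
        rw [if_neg h2]
        exact ih

theorem pvFilter_ge_step (C : List Int) (i : Int) :
    (C.filter (fun c => decide (i ≤ c))).filter (fun c => decide (i + 1 ≤ c))
      = C.filter (fun c => decide (i + 1 ≤ c)) := by
  rw [List.filter_filter]
  apply List.filter_congr
  intro x _; simp; omega

-- the two loops agree step by step (R : descending rows, C : ascending cols, D ~ C)
theorem pvLoop_eq (R C D : List Int) (hC : C.Pairwise (fun a b => a ≤ b)) (hP : D.Perm C)
    (l : List Int) :
    ∀ (i : Nat), R.drop i = l →
    pvBLoop l (C.filter (fun c => decide ((i : Int) ≤ c))) (i : Int) ((R.take i).sum)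
        ((C.filter (fun c => decide (c < (i : Int)))).sum)
      = pvALoop (PySem.List.pyRange ((i : Int) + 1) ((R.length : Int) + 1) 1) R D := by
  induction l with
  | nil =>
    intro i hdrop
    have hlen : R.length ≤ i := by
      have := congrArg List.length hdrop
      simp at this; omega
    rw [PySem.List.pyRange_one_eq_nil (by exact_mod_cast (by omega : (R.length : Int) + 1 ≤ (i : Int) + 1))]
    simp [pvBLoop, pvALoop]
  | cons r l' ih =>
    intro i hdrop
    have hi : i < R.length := by
      by_contra hcon
      rw [List.drop_eq_nil_of_le (by omega)] at hdrop
      exact List.cons_ne_nil _ _ hdrop.symm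
    have hget : R[i]'hi = r := by
      have h0 : (R.drop i)[0]? = some r := by rw [hdrop]; rfl
      rw [List.getElem?_drop, Nat.add_zero, List.getElem?_eq_getElem hi] at h0
      exact Option.some.inj h0
    have hdrop' : R.drop (i + 1) = l' := by
      calc R.drop (i + 1) = (R.drop i).drop 1 := by rw [List.drop_drop, Nat.add_comm]
        _ = l' := by simp [hdrop]
    have hCs : (C.filter (fun c => decide ((i : Int) ≤ c))).Pairwise (fun a b => a ≤ b) :=
      hC.filter _
    -- unfold one B step
    simp only [pvBLoop]
    rw [pvConsume_sorted _ _ _ hCs]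
    -- the new state components
    rw [pvFilter_ge_step C i, ← pvSum_split C i]
    -- unfold one A step
    rw [PySem.List.pyRange_one_cons (by exact_mod_cast (by omega : (i : Int) + 1 < (R.length : Int) + 1))]
    simp only [pvALoop]
    -- both guards compute the same comparison
    have htoNat : ((i : Int) + 1).toNat = i + 1 := by omega
    have hlhs : (PySem.List.slice R none (some ((i : Int) + 1))).sum = (R.take i).sum + r := by
      rw [PySem.List.slice_to]
      · rw [htoNat, List.take_add_one]
        simp [List.getElem?_eq_getElem hi, hget]
      · omega
    have hrhs : (C.filter (fun c => decide (c < (i : Int) + 1))).sum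
        + ((i : Int) + 1) * ((C.filter (fun c => decide ((i : Int) + 1 ≤ c))).length : Int)
        = (D.map (fun c => min c ((i : Int) + 1))).sum := by
      rw [pvRhs_eq C ((i : Int) + 1)]
      exact ((hP.map _).sum_eq).symm
    by_cases hcond : (R.take i).sum + r > (D.map (fun c => min c ((i : Int) + 1))).sum
    · rw [if_pos (by rw [hrhs]; exact hcond), if_pos (by rw [hlhs]; exact hcond)]
    · rw [if_neg (by rw [hrhs]; exact hcond), if_neg (by rw [hlhs]; exact hcond)]
      have hih := ih (i + 1) hdrop'
      push_cast at hih ⊢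
      rw [← hih]
      congr 1
      rw [List.take_add_one]
      simp [List.getElem?_eq_getElem hi, hget]

-- the common tail after the guards: the two loops started from their initial states
theorem pvTail_eq (r01 c01 : List Int) (m : Int) (hm : m = (r01.length : Int))
    (hcnn : ∀ x ∈ c01, (0 : Int) ≤ x) :
    pvALoop (PySem.List.pyRange 1 (m + 1) 1)
        (PySem.List.sorted r01 (fun x => x) true) (PySem.List.sorted c01 (fun x => x) true)
      = pvBLoop (PySem.List.sorted r01 (fun x => x) true)
          (PySem.List.sorted c01 (fun x => x) false) 0 0 0 := by
  have hC : (PySem.List.sorted c01 (fun x => x) false).Pairwise (fun a b => a ≤ b) :=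
    PySem.List.sorted_pairwise c01 (fun x => x)
  have hP : (PySem.List.sorted c01 (fun x => x) true).Perm
      (PySem.List.sorted c01 (fun x => x) false) :=
    (PySem.List.sorted_perm c01 (fun x => x) true).trans
      (PySem.List.sorted_perm c01 (fun x => x) false).symm
  have hnonneg : ∀ x ∈ PySem.List.sorted c01 (fun x => x) false, (0 : Int) ≤ x := by
    intro x hx
    exact hcnn x ((PySem.List.mem_sorted _ _ _ _).mp hx)
  have h0f : (PySem.List.sorted c01 (fun x => x) false).filter
      (fun c => decide ((0 : Int) ≤ c)) = PySem.List.sorted c01 (fun x => x) false := by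
    apply List.filter_eq_self.mpr
    intro x hx; simpa using hnonneg x hx
  have h0e : (PySem.List.sorted c01 (fun x => x) false).filter
      (fun c => decide (c < (0 : Int))) = [] := by
    apply List.filter_eq_nil_iff.mpr
    intro x hx; simpa using not_lt.mpr (hnonneg x hx)
  have hmain := pvLoop_eq (PySem.List.sorted r01 (fun x => x) true)
    (PySem.List.sorted c01 (fun x => x) false)
    (PySem.List.sorted c01 (fun x => x) true) hC hP
    (PySem.List.sorted r01 (fun x => x) true) 0 rfl
  simp only [Nat.cast_zero, List.take_zero, List.sum_nil, h0f, h0e, zero_add] at hmain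
  rw [hmain]
  congr 2
  rw [hm, PySem.List.length_sorted]

-- ===== VERDICT (by name: the statement is the Claim_ definition above) =====
theorem gale_ryser_check_spec : Claim_equal_gale_ryser_check := by
  intro row_sums col_sums _
  unfold Spec_gale_ryser_check gale_ryser_check gale_ryser_check_alt
  simp only []
  cases h1 : (List.map (fun r => PySem.Int.floordiv (r + (col_sums.length : Int)) 2) row_sums).any
      (fun r => decide (r < 0 ∨ (col_sums.length : Int) < r)) with
  | true => simp
  | false =>
    cases h2 : (List.map (fun c => PySem.Int.floordiv (c + (row_sums.length : Int)) 2) col_sums).any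
        (fun c => decide (c < 0 ∨ (row_sums.length : Int) < c)) with
    | true => simp
    | false =>
      simp only [Bool.false_or, Bool.false_eq_true, if_false]
      by_cases h3 : (List.map (fun r => PySem.Int.floordiv (r + (col_sums.length : Int)) 2) row_sums).sum
          ≠ (List.map (fun c => PySem.Int.floordiv (c + (row_sums.length : Int)) 2) col_sums).sum
      · rw [if_pos h3, if_pos h3]
      · rw [if_neg h3, if_neg h3]
        apply pvTail_eq
        · simp
        · intro x hx
          have hq := (List.any_eq_false.mp h2) x hx
          simp only [decide_eq_true_eq] at hq
          omega
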